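-- pv_equiv track=rewrite | github.com/pranaliSawadh/python-practical | practical4/change_case.py | capital_case
-- ===== SOURCE A (Python) =====
-- def capital_case(text):
-- 		n = ""
-- 		for i in text:
-- 			if ord(i)>=97 and ord(i)<=122:
-- 				num = ord(i)-32
-- 				n = n+chr(num)
-- 			elif ord(i)>=65 and ord(i)<=90:
-- 			 		n = n+i
-- 		return n
-- ===== SOURCE B (Python) =====
-- import re
--
-- def capital_case(text):
--     return re.sub('[^A-Za-z]', '', text).upper()
-- ===== Notes on version B (the rewrite author's own statement) =====
-- stated objective: idiomatic
-- what changed: Replaces the per-character ord-arithmetic accumulator loop with a regex deletion of all non-ASCII-letters followed by a single .upper() call.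
import Mathlib
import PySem

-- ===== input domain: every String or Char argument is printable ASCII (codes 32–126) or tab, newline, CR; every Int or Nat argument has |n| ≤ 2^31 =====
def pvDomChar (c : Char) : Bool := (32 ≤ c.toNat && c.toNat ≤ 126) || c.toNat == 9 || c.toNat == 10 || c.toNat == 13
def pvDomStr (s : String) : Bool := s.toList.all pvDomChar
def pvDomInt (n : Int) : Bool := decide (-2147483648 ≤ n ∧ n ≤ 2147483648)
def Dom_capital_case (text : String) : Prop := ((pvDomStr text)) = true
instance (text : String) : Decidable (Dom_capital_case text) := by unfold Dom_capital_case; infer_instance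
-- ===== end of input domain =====

-- B replaces A's per-character ord-arithmetic accumulator loop by a regex filter of
-- non-ASCII-letters followed by one .upper() pass (same values; idiomatic).

-- ===== PORT A =====
-- A: loop over characters, accumulator (kept as a List Char, joined to a String at the end)
def capital_case_loop (cs : List Char) (n : List Char) : List Char :=
  match cs with
  | [] => n
  | i :: rest =>
    if 97 ≤ i.toNat ∧ i.toNat ≤ 122 then
      capital_case_loop rest (n ++ [Char.ofNat (i.toNat - 32)])
    else if 65 ≤ i.toNat ∧ i.toNat ≤ 90 then
      capital_case_loop rest (n ++ [i])
    else
      capital_case_loop rest n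

def capital_case (text : String) : String :=
  String.mk (capital_case_loop text.toList [])

-- ===== PORT B =====
-- first pass: re.sub('[^A-Za-z]', '', text) — delete every non-ASCII-letter
def pvIsAsciiLetter (c : Char) : Bool :=
  (65 ≤ c.toNat && c.toNat ≤ 90) || (97 ≤ c.toNat && c.toNat ≤ 122)

-- second pass: str.upper (exact on ASCII letters, which is all that survives the filter)
def pvUpperChar (c : Char) : Char :=
  if 97 ≤ c.toNat ∧ c.toNat ≤ 122 then Char.ofNat (c.toNat - 32) else c

def capital_case_alt (text : String) : String :=
  String.mk ((text.toList.filter pvIsAsciiLetter).map pvUpperChar)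

-- ===== PRECONDITION & SPEC =====
def Spec_capital_case (text : String) (out : String) : Prop := out = capital_case_alt text
instance (text : String) (out : String) : Decidable (Spec_capital_case text out) := by unfold Spec_capital_case; infer_instance

-- ===== CLAIM (what is proved, stated in full; the proofs are below) =====
def Claim_equal_capital_case : Prop := ∀ (text : String), Dom_capital_case text → Spec_capital_case text (capital_case text)

-- ===== LEMMAS AND PROOFS =====
theorem capital_case_loop_eq (cs : List Char) (n : List Char) :
    capital_case_loop cs n = n ++ (cs.filter pvIsAsciiLetter).map pvUpperChar := by
  induction cs generalizing n with
  | nil => simp [capital_case_loop]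
  | cons i rest ih =>
    by_cases hl : 97 ≤ i.toNat ∧ i.toNat ≤ 122
    · simp [capital_case_loop, hl, ih, List.filter, pvIsAsciiLetter, pvUpperChar]
    · by_cases hu : 65 ≤ i.toNat ∧ i.toNat ≤ 90
      · simp [capital_case_loop, hl, hu, ih, List.filter, pvIsAsciiLetter, pvUpperChar]
      · simp only [capital_case_loop, if_neg hl, if_neg hu, ih]
        have : pvIsAsciiLetter i = false := by
          simp [pvIsAsciiLetter]; omega
        simp [List.filter, this]

-- ===== VERDICT (by name: the statement is the Claim_ definition above) =====
theorem capital_case_spec : Claim_equal_capital_case := by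
  intro text _
  unfold Spec_capital_case capital_case capital_case_alt
  rw [capital_case_loop_eq]
  simp
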